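-- pv_equiv track=rewrite | github.com/metabolean5/enthymemes2025 | tree_parser_news_corpus.py | has_causal
-- ===== SOURCE A (Python) =====
-- def has_causal(text, entities):
--     causal_connectives = [
--         "because", "due to", "owing to", "on account of", "given that",
--         "in view of the fact that", "therefore", "thus", "hence", "consequently",
--         "as a result", "accordingly", "for that reason", "thereby", "in consequence",
--         "in order that", "in order to", "with the aim of", "with the purpose of"
--     ]
--     tokens = text.lower().split()
--     entity_list = [e.strip().lower() for e in entities.split(',')]
--
--     for connective in causal_connectives:
--         for i, token in enumerate(tokens):
--             if token == connective:
--                 start = max(0, i - 10)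
--                 end = min(len(tokens), i + 11)
--                 for entity in entity_list:
--                     if entity in tokens[start:end]:
--                         return True
--     return False
-- ===== SOURCE B (Python) =====
-- CAUSAL_CONNECTIVES = frozenset([
--     "because", "due to", "owing to", "on account of", "given that",
--     "in view of the fact that", "therefore", "thus", "hence", "consequently",
--     "as a result", "accordingly", "for that reason", "thereby", "in consequence",
--     "in order that", "in order to", "with the aim of", "with the purpose of"
-- ])
--
-- def has_causal(text, entities):
--     # Different algorithm: build the sorted position lists of connective tokens
--     # and of entity tokens, then detect a pair at distance <= 10 with a
--     # two-pointer merge (no window slices, no per-connective rescans).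
--     tokens = text.lower().split()
--     entity_set = {e.strip().lower() for e in entities.split(',')}
--     conn_pos = [i for i, t in enumerate(tokens) if t in CAUSAL_CONNECTIVES]
--     ent_pos = [j for j, t in enumerate(tokens) if t in entity_set]
--     p = q = 0
--     while p < len(conn_pos) and q < len(ent_pos):
--         if abs(conn_pos[p] - ent_pos[q]) <= 10:
--             return True
--         if conn_pos[p] < ent_pos[q]:
--             p += 1
--         else:
--             q += 1
--     return False
-- ===== Notes on version B (the rewrite author's own statement) =====
-- stated objective: alternative
-- what changed: Instead of scanning for each of the 19 connectives and testing a +/-10 token window slice against the entity list, B extracts the sorted position lists of connective tokens and of entity tokens in one pass each and detects a pair at distance <= 10 with a two-pointer merge, with no window slicing at all.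
import Mathlib
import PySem

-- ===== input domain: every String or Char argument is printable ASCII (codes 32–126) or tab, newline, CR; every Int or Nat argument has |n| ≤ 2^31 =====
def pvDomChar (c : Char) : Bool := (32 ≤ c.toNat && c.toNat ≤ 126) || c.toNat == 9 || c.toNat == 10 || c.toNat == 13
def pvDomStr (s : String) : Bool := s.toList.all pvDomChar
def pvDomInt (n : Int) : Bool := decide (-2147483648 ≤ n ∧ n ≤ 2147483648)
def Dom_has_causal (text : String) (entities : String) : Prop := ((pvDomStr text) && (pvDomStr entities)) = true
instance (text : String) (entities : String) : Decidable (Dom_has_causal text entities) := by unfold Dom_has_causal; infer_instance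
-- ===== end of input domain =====

-- B replaces A's per-connective window-slice scan by extracting the sorted position lists of
-- connective tokens and entity tokens and running a two-pointer merge for a pair at distance ≤ 10
-- (objective: alternative algorithm).

-- ===== PORT A =====
def has_causal (text : String) (entities : String) : Bool :=
  let causal_connectives : List String := [
    "because", "due to", "owing to", "on account of", "given that",
    "in view of the fact that", "therefore", "thus", "hence", "consequently",
    "as a result", "accordingly", "for that reason", "thereby", "in consequence",
    "in order that", "in order to", "with the aim of", "with the purpose of"]
  let tokens := PySem.Str.split₀ (PySem.Str.lower text)
  let entity_list := ((PySem.Str.split? entities ",").getD []).map (fun e => PySem.Str.lower (PySem.Str.strip e))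
  causal_connectives.any (fun connective =>
    (PySem.List.enumerate tokens 0).any (fun it =>
      it.2 == connective &&
        entity_list.any (fun entity =>
          (PySem.List.slice tokens (some (max 0 (it.1 - 10)))
            (some (min (PySem.List.len tokens) (it.1 + 11)))).contains entity)))

-- ===== PORT B =====
def ccSet : PySem.Set String := PySem.Set.ofList [
    "because", "due to", "owing to", "on account of", "given that",
    "in view of the fact that", "therefore", "thus", "hence", "consequently",
    "as a result", "accordingly", "for that reason", "thereby", "in consequence",
    "in order that", "in order to", "with the aim of", "with the purpose of"]

-- two-pointer merge over the sorted position lists: true iff some pair is within distance 10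
def pvClose : List Int → List Int → Bool
  | [], _ => false
  | _ :: _, [] => false
  | i :: is, j :: js =>
      if (i - j).natAbs ≤ 10 then true
      else if i < j then pvClose is (j :: js)
      else pvClose (i :: is) js
  termination_by C E => C.length + E.length

def has_causal_alt (text : String) (entities : String) : Bool :=
  let tokens := PySem.Str.split₀ (PySem.Str.lower text)
  let entity_set : PySem.Set String :=
    PySem.Set.ofList (((PySem.Str.split? entities ",").getD []).map (fun e => PySem.Str.lower (PySem.Str.strip e)))
  let conn_pos := ((PySem.List.enumerate tokens 0).filter (fun it => PySem.Set.contains ccSet it.2)).map Prod.fst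
  let ent_pos := ((PySem.List.enumerate tokens 0).filter (fun it => PySem.Set.contains entity_set it.2)).map Prod.fst
  pvClose conn_pos ent_pos

-- ===== PRECONDITION & SPEC =====
def Spec_has_causal (text : String) (entities : String) (out : Bool) : Prop := out = has_causal_alt text entities
instance (text : String) (entities : String) (out : Bool) : Decidable (Spec_has_causal text entities out) := by unfold Spec_has_causal; infer_instance

-- ===== CLAIM (what is proved, stated in full; the proofs are below) =====
def Claim_equal_has_causal : Prop := ∀ (text : String) (entities : String), Dom_has_causal text entities → Spec_has_causal text entities (has_causal text entities)

-- ===== LEMMAS AND PROOFS =====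

-- the merge detects a close pair iff one exists, on strictly increasing lists
theorem pvClose_iff (C E : List Int) (hC : C.Pairwise (· < ·)) (hE : E.Pairwise (· < ·)) :
    pvClose C E = true ↔ ∃ i ∈ C, ∃ j ∈ E, (i - j).natAbs ≤ 10 := by
  fun_induction pvClose C E with
  | case1 E => simp
  | case2 i is => simp
  | case3 i is j js h => simpa using Or.inl (Or.inl h)
  | case4 i is j js h hlt ih =>
      rw [ih (hC.sublist (List.sublist_cons_self i is)) hE]
      constructor
      · rintro ⟨a, ha, b, hb, hab⟩; exact ⟨a, List.mem_cons_of_mem i ha, b, hb, hab⟩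
      · rintro ⟨a, ha, b, hb, hab⟩
        rcases List.mem_cons.mp ha with rfl | ha'
        · exfalso
          rcases List.mem_cons.mp hb with rfl | hb'
          · exact h hab
          · have : j < b := (List.pairwise_cons.mp hE).1 b hb'
            omega
        · exact ⟨a, ha', b, hb, hab⟩
  | case5 i is j js h hlt ih =>
      rw [ih hC (hE.sublist (List.sublist_cons_self j js))]
      constructor
      · rintro ⟨a, ha, b, hb, hab⟩; exact ⟨a, ha, b, List.mem_cons_of_mem j hb, hab⟩
      · rintro ⟨a, ha, b, hb, hab⟩
        rcases List.mem_cons.mp hb with rfl | hb'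
        · exfalso
          rcases List.mem_cons.mp ha with rfl | ha'
          · exact h hab
          · have : i < a := (List.pairwise_cons.mp hC).1 a ha'
            omega
        · exact ⟨a, ha, b, hb', hab⟩

-- the position lists B extracts are strictly increasing
theorem pos_pairwise {α : Type} (xs : List α) (p : Int × α → Bool) :
    (((PySem.List.enumerate xs 0).filter p).map Prod.fst).Pairwise (· < ·) := by
  rw [List.pairwise_map]
  exact (PySem.List.pairwise_lt_enumerate xs 0).sublist List.filter_sublist

-- membership in A's clamped window slice ↔ a token index at distance ≤ 10
theorem mem_window_iff (tokens : List String) (k : Nat) (hk : k < tokens.length) (e : String) :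
    e ∈ PySem.List.slice tokens (some (max 0 ((k : Int) - 10)))
          (some (min (PySem.List.len tokens) ((k : Int) + 11)))
      ↔ ∃ (j : Nat) (hj : j < tokens.length), tokens[j] = e ∧ ((k : Int) - (j : Int)).natAbs ≤ 10 := by
  set a : Int := max 0 ((k : Int) - 10) with ha
  set b : Int := min (PySem.List.len tokens) ((k : Int) + 11) with hb
  have ha0 : 0 ≤ a := le_max_left _ _
  have hb0 : 0 ≤ b := by
    simp only [hb, PySem.List.len_eq, le_min_iff]
    constructor <;> omega
  rw [PySem.List.slice_toNat tokens ha0 hb0]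
  rw [List.mem_iff_getElem]
  constructor
  · rintro ⟨m, hm, hget⟩
    simp only [List.getElem_take, List.getElem_drop] at hget
    simp only [List.length_take, List.length_drop] at hm
    refine ⟨a.toNat + m, by omega, hget, ?_⟩
    simp only [ha, hb, PySem.List.len_eq] at *
    omega
  · rintro ⟨j, hj, hget, hdist⟩
    have hrange : a.toNat ≤ j ∧ j < b.toNat := by
      simp only [ha, hb, PySem.List.len_eq] at *
      omega
    refine ⟨j - a.toNat, ?_, ?_⟩
    · simp only [List.length_take, List.length_drop]; omega
    · simp only [List.getElem_take, List.getElem_drop]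
      have : a.toNat + (j - a.toNat) = j := by omega
      simp only [this]; exact hget

-- core equivalence at the token/entity-list level
theorem agree_core (tokens ents : List String) :
    ([
    "because", "due to", "owing to", "on account of", "given that",
    "in view of the fact that", "therefore", "thus", "hence", "consequently",
    "as a result", "accordingly", "for that reason", "thereby", "in consequence",
    "in order that", "in order to", "with the aim of", "with the purpose of"] : List String).any
      (fun connective => (PySem.List.enumerate tokens 0).any (fun it =>
        it.2 == connective &&
          ents.any (fun entity =>
            (PySem.List.slice tokens (some (max 0 (it.1 - 10)))
              (some (min (PySem.List.len tokens) (it.1 + 11)))).contains entity)))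
    = pvClose
        (((PySem.List.enumerate tokens 0).filter (fun it => PySem.Set.contains ccSet it.2)).map Prod.fst)
        (((PySem.List.enumerate tokens 0).filter (fun it => PySem.Set.contains (PySem.Set.ofList ents) it.2)).map Prod.fst) := by
  apply Bool.eq_iff_iff.mpr
  rw [pvClose_iff _ _ (pos_pairwise _ _) (pos_pairwise _ _)]
  simp only [List.any_eq_true, Bool.and_eq_true, beq_iff_eq, List.contains_iff_mem,
    List.mem_map, List.mem_filter, PySem.List.mem_enumerate_iff, zero_add,
    PySem.Set.contains_iff, PySem.Set.mem_ofList, ccSet]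
  constructor
  · rintro ⟨c, hc, it, ⟨k, hk, rfl⟩, hcon, e, he, hmem⟩
    obtain ⟨j, hj, hget, hdist⟩ := (mem_window_iff tokens k hk e).mp hmem
    refine ⟨(k : Int), ⟨(k, tokens[k]), ⟨⟨k, hk, rfl⟩, hcon.symm ▸ hc⟩, rfl⟩,
            (j : Int), ⟨(j, tokens[j]), ⟨⟨j, hj, rfl⟩, hget.symm ▸ he⟩, rfl⟩, hdist⟩
  · rintro ⟨i, ⟨it, ⟨⟨k, hk, rfl⟩, hcc⟩, rfl⟩, j, ⟨it', ⟨⟨m, hm, rfl⟩, hent⟩, rfl⟩, hdist⟩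
    simp only at hcc hent hdist ⊢
    refine ⟨tokens[k], hcc, (k, tokens[k]), ⟨k, hk, rfl⟩, rfl, tokens[m], hent, ?_⟩
    exact (mem_window_iff tokens k hk tokens[m]).mpr ⟨m, hm, rfl, hdist⟩

theorem has_causal_agree (text entities : String) :
    has_causal text entities = has_causal_alt text entities := by
  unfold has_causal has_causal_alt
  exact agree_core _ _

-- ===== VERDICT (by name: the statement is the Claim_ definition above) =====
theorem has_causal_spec : Claim_equal_has_causal := by
  intro text entities _
  unfold Spec_has_causal
  exact has_causal_agree text entities
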